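-- pv_equiv track=rewrite | github.com/LeeHyogon/cs- | 백준/Silver/1283. 단축키 지정/단축키 지정.py | chg_str
-- ===== SOURCE A (Python) =====
-- def chg_str ( string, idx):
--     str = ""
--
--     for i, c in enumerate(string):
--         if i == idx:
--             str = str + '[' + c + ']'
--         else:
--             str = str + c
--
--     return str
-- ===== SOURCE B (Python) =====
-- def chg_str(string, idx):
--     if 0 <= idx < len(string):
--         return string[:idx] + '[' + string[idx] + ']' + string[idx+1:]
--     return string
-- ===== Notes on version B (the rewrite author's own statement) =====
-- stated objective: faster
-- what changed: Replaces the per-character accumulating loop with a single closed-form slice concatenation string[:idx]+'['+string[idx]+']'+string[idx+1:], returning the string unchanged when idx is out of range.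
import Mathlib
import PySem

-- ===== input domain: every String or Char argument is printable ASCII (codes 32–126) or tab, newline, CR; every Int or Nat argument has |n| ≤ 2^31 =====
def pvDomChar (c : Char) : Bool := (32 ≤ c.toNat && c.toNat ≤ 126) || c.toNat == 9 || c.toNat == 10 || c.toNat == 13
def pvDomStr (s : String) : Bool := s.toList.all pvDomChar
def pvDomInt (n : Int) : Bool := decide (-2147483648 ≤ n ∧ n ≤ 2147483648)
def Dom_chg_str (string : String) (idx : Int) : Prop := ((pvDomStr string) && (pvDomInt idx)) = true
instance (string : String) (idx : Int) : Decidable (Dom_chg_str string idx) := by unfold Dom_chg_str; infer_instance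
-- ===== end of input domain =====

-- B replaces A's per-character accumulating loop with one closed-form slice concatenation, avoiding quadratic repeated concatenation (objective: faster, measured).

-- ===== PORT A =====
-- A: accumulate character by character over enumerate(string), bracketing the one at position idx.
def chg_str (string : String) (idx : Int) : String :=
  String.ofList ((PySem.List.enumerate string.toList 0).foldl
    (fun acc (p : Int × Char) =>
      if p.1 = idx then acc ++ ['[', p.2, ']'] else acc ++ [p.2]) [])

-- ===== PORT B =====
-- B: string[:idx] + '[' + string[idx] + ']' + string[idx+1:] under the range guard, else the string unchanged.
def chg_str_alt (string : String) (idx : Int) : String :=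
  if 0 ≤ idx ∧ idx < (string.toList.length : Int) then
    match PySem.List.pyGet? string.toList idx with
    | some c =>
        String.ofList (PySem.List.slice string.toList none (some idx) ++
          '[' :: c :: ']' :: PySem.List.slice string.toList (some (idx + 1)) none)
    | none => string
  else
    string

-- ===== PRECONDITION & SPEC =====
def Spec_chg_str (string : String) (idx : Int) (out : String) : Prop := out = chg_str_alt string idx
instance (string : String) (idx : Int) (out : String) : Decidable (Spec_chg_str string idx out) := by unfold Spec_chg_str; infer_instance

-- ===== CLAIM (what is proved, stated in full; the proofs are below) =====
def Claim_equal_chg_str : Prop := ∀ (string : String) (idx : Int), Dom_chg_str string idx → Spec_chg_str string idx (chg_str string idx)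

-- ===== LEMMAS AND PROOFS =====

-- A's loop body as a flatMap chunk
def pvBracket (idx : Int) (p : Int × Char) : List Char :=
  if p.1 = idx then ['[', p.2, ']'] else [p.2]

theorem pvBracket_shift (cs : List Char) (s idx : Int) :
    (PySem.List.enumerate cs (s + 1)).flatMap (pvBracket idx)
      = (PySem.List.enumerate cs s).flatMap (pvBracket (idx - 1)) := by
  induction cs generalizing s with
  | nil => simp [PySem.List.enumerate_nil]
  | cons x xs ih =>
    simp only [PySem.List.enumerate_cons, List.flatMap_cons, ih (s + 1), pvBracket]
    by_cases h : s = idx - 1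
    · rw [if_pos h, if_pos (by omega)]
    · rw [if_neg h, if_neg (by omega)]

theorem pvFlat_eq (cs : List Char) (idx : Int) :
    (PySem.List.enumerate cs 0).flatMap (pvBracket idx)
      = if 0 ≤ idx ∧ idx < (cs.length : Int) then
          cs.take idx.toNat ++ '[' :: cs.getD idx.toNat ' ' :: ']' :: cs.drop (idx.toNat + 1)
        else cs := by
  induction cs generalizing idx with
  | nil =>
    simp only [PySem.List.enumerate_nil, List.flatMap_nil, List.length_nil]
    rw [if_neg (by omega)]
  | cons x xs ih =>
    rw [PySem.List.enumerate_cons, List.flatMap_cons,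
      show (0 : Int) + 1 = 0 + 1 from rfl, pvBracket_shift xs 0 idx, ih (idx - 1)]
    by_cases h0 : idx = 0
    · subst h0
      simp [pvBracket]
    · rw [pvBracket, if_neg (by omega)]
      by_cases hin : 0 ≤ idx - 1 ∧ idx - 1 < (xs.length : Int)
      · rw [if_pos hin, if_pos (by simp only [List.length_cons]; push_cast; omega)]
        have h1 : idx.toNat = (idx - 1).toNat + 1 := by omega
        rw [h1, List.take_succ_cons, List.getD_cons_succ, List.drop_succ_cons]
        rfl
      · rw [if_neg hin, if_neg (by simp only [List.length_cons]; push_cast; omega)]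
        rfl

theorem pv_main : ∀ (s : String) (idx : Int), chg_str s idx = chg_str_alt s idx := by
  intro s idx
  unfold chg_str chg_str_alt
  have hbody : (fun (acc : List Char) (p : Int × Char) =>
      if p.1 = idx then acc ++ ['[', p.2, ']'] else acc ++ [p.2])
      = fun acc p => acc ++ pvBracket idx p := by
    funext acc p; unfold pvBracket; split <;> rfl
  rw [hbody, PySem.List.foldl_append_eq_flatMap (pvBracket idx) (PySem.List.enumerate s.toList 0) [],
    List.nil_append, pvFlat_eq s.toList idx]
  by_cases h : 0 ≤ idx ∧ idx < (s.toList.length : Int)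
  · rw [if_pos h, if_pos h]
    have hlt : idx.toNat < s.toList.length := by omega
    rw [PySem.List.pyGet?_eq_some_getElem s.toList h.1 h.2]
    rw [PySem.List.slice_to s.toList h.1, PySem.List.slice_from s.toList (show (0:Int) ≤ idx + 1 by omega)]
    have h1 : (idx + 1).toNat = idx.toNat + 1 := by omega
    rw [h1, List.getD_eq_getElem _ _ hlt]
  · rw [if_neg h, if_neg h, String.ofList_toList]

-- ===== VERDICT (by name: the statement is the Claim_ definition above) =====
theorem chg_str_spec : Claim_equal_chg_str := fun s idx _ => pv_main s idx
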